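-- pv_equiv track=rewrite | github.com/alvinchangw/DCEN_CHIL2021 | train_and_infer.py | get_splice_junctions
-- ===== SOURCE A (Python) =====
-- def get_splice_junctions(transcripts, gene_start_token_position=-1, gene_end_token_position=9999999):
--     all_transcripts_splice_junctions = []
--     for transcript in transcripts:
--         transcript_splice_junctions = []
--
--         prev_don = gene_start_token_position
--         prev_acc = None
--         for exon_ind, exon in enumerate(transcript):
--             cur_acc, cur_don = exon
--             cur_splice_junction = (prev_don, cur_acc)
--
--             transcript_splice_junctions.append(cur_splice_junction)
--
--             prev_acc = cur_acc
--             prev_don = cur_don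
--
--         final_splice_junction = (prev_don, gene_end_token_position)
--         transcript_splice_junctions.append(final_splice_junction)
--
--         all_transcripts_splice_junctions.append(transcript_splice_junctions)
--     return all_transcripts_splice_junctions
-- ===== SOURCE B (Python) =====
-- def get_splice_junctions(transcripts, gene_start_token_position=-1, gene_end_token_position=9999999):
--     all_transcripts_splice_junctions = []
--     for transcript in transcripts:
--         donors = [gene_start_token_position] + [don for acc, don in transcript]
--         acceptors = [acc for acc, don in transcript] + [gene_end_token_position]
--         all_transcripts_splice_junctions.append(list(zip(donors, acceptors)))
--     return all_transcripts_splice_junctions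
-- ===== Notes on version B (the rewrite author's own statement) =====
-- stated objective: simpler
-- what changed: Replaces the threaded prev_don/prev_acc state machine with two parallel sequences (donors shifted by the gene-start token, acceptors extended by the gene-end token) zipped together per transcript.
import Mathlib
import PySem

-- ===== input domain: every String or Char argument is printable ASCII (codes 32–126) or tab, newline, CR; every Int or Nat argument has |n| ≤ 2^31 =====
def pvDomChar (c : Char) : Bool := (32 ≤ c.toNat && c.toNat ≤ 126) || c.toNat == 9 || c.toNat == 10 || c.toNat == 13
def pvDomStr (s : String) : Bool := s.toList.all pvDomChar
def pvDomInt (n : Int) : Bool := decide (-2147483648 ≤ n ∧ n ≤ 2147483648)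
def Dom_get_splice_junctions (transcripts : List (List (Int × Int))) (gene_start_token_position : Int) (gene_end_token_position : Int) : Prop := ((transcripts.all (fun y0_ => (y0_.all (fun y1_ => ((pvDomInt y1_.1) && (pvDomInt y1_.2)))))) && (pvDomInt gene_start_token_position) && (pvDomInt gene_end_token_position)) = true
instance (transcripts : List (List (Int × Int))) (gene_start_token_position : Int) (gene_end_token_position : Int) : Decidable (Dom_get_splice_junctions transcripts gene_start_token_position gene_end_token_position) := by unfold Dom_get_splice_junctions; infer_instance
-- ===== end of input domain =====

-- B replaces A's threaded prev_don state machine with zipping a shifted donor list against an extended acceptor list (simpler decomposition, same cost).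


-- ===== PORT A =====
-- inner loop over a transcript: state = (prev_don, junctions so far)
def get_splice_junctions (transcripts : List (List (Int × Int))) (gene_start_token_position : Int) (gene_end_token_position : Int) : List (List (Int × Int)) :=
  transcripts.foldl (fun all transcript =>
    let st := transcript.foldl
      (fun (st : Int × List (Int × Int)) exon =>
        (exon.2, st.2 ++ [(st.1, exon.1)]))
      (gene_start_token_position, [])
    all ++ [st.2 ++ [(st.1, gene_end_token_position)]]) []

-- ===== PORT B =====
def get_splice_junctions_alt (transcripts : List (List (Int × Int))) (gene_start_token_position : Int) (gene_end_token_position : Int) : List (List (Int × Int)) :=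
  transcripts.foldl (fun all transcript =>
    let donors := gene_start_token_position :: transcript.map (fun e => e.2)
    let acceptors := transcript.map (fun e => e.1) ++ [gene_end_token_position]
    all ++ [donors.zip acceptors]) []

-- ===== PRECONDITION & SPEC =====
def Spec_get_splice_junctions (transcripts : List (List (Int × Int))) (gene_start_token_position : Int) (gene_end_token_position : Int) (out : List (List (Int × Int))) : Prop := out = get_splice_junctions_alt transcripts gene_start_token_position gene_end_token_position
instance (transcripts : List (List (Int × Int))) (gene_start_token_position : Int) (gene_end_token_position : Int) (out : List (List (Int × Int))) : Decidable (Spec_get_splice_junctions transcripts gene_start_token_position gene_end_token_position out) := by unfold Spec_get_splice_junctions; infer_instance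

-- ===== CLAIM (what is proved, stated in full; the proofs are below) =====
def Claim_equal_get_splice_junctions : Prop := ∀ (transcripts : List (List (Int × Int))) (gene_start_token_position : Int) (gene_end_token_position : Int), Dom_get_splice_junctions transcripts gene_start_token_position gene_end_token_position → Spec_get_splice_junctions transcripts gene_start_token_position gene_end_token_position (get_splice_junctions transcripts gene_start_token_position gene_end_token_position)

-- ===== LEMMAS AND PROOFS =====
-- loop invariant for A's inner fold: finishing the fold and appending the final
-- junction yields the accumulator followed by B's zip of the shifted lists
theorem inner_eq (fin : Int) (t : List (Int × Int)) : ∀ (d : Int) (acc : List (Int × Int)),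
    (let st := t.foldl (fun (st : Int × List (Int × Int)) exon => (exon.2, st.2 ++ [(st.1, exon.1)])) (d, acc)
     st.2 ++ [(st.1, fin)])
    = acc ++ (d :: t.map (fun e => e.2)).zip (t.map (fun e => e.1) ++ [fin]) := by
  induction t with
  | nil => intro d acc; simp
  | cons e rest ih =>
    intro d acc
    simp only [List.foldl_cons, List.map_cons]
    rw [ih e.2 (acc ++ [(d, e.1)])]
    simp

-- ===== VERDICT (by name: the statement is the Claim_ definition above) =====
theorem get_splice_junctions_spec : Claim_equal_get_splice_junctions := by
  intro transcripts s e hd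
  clear hd
  unfold Spec_get_splice_junctions get_splice_junctions get_splice_junctions_alt
  induction transcripts using List.reverseRecOn with
  | nil => rfl
  | append_singleton ts t ih =>
    simp only [List.foldl_append, List.foldl_cons, List.foldl_nil]
    rw [ih, inner_eq e t s []]
    simp
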